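-- pv_equiv track=rewrite | github.com/JackSmith111977/Hermes-Cap-Pack | packages/skill-governance/skill_governance/fixer/rules/f006_f007.py | _infer_classification_from_tags_and_desc
-- ===== SOURCE A (Python) =====
-- _TAG_HINTS: dict[str, str] = {
--     # infrastructure hints
--     "quality": "infrastructure",
--     "engine": "infrastructure",
--     "monitoring": "infrastructure",
--     "gate": "infrastructure",
--     "infra": "infrastructure",
--     # toolset hints
--     "workflow": "toolset",
--     "process": "toolset",
--     "pipeline": "toolset",
--     "automation": "toolset",
--     "orchestration": "toolset",
--     "integration": "toolset",
--     # domain hints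
--     "domain": "domain",
--     "creative": "domain",
--     "design": "domain",
--     "analysis": "domain",
-- }
--
-- def _infer_classification_from_tags_and_desc(
--     skill_tags: list[str], description: str
-- ) -> str | None:
--     """Scan skill-level tags and pack description for classification hints.
--
--     Collects classification "votes" from known tag/description keywords
--     and returns the one with the highest count.  Returns ``None`` when no
--     hints are found.
--     """
--     votes: dict[str, int] = {}
--     text = " ".join(skill_tags).lower() + " " + description.lower()
--
--     for keyword, classification in _TAG_HINTS.items():
--         if keyword in text:
--             votes[classification] = votes.get(classification, 0) + 1
--
--     if not votes:
--         return None
--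
--     # Return the classification with the most votes
--     return max(votes, key=lambda k: (votes[k], k))  # tie-break by name
-- ===== SOURCE B (Python) =====
-- # Three staged keyword counts plus an unrolled decision ladder replace A's
-- # vote dict and max-with-key (objective: simpler).
-- _INFRA_KWS = ("quality", "engine", "monitoring", "gate", "infra")
-- _TOOLSET_KWS = ("workflow", "process", "pipeline", "automation",
--                 "orchestration", "integration")
-- _DOMAIN_KWS = ("domain", "creative", "design", "analysis")
--
--
-- def _infer_classification_from_tags_and_desc(
--     skill_tags: list[str], description: str
-- ) -> str | None:
--     text = " ".join(skill_tags).lower() + " " + description.lower()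
--     infra = sum(kw in text for kw in _INFRA_KWS)
--     tool = sum(kw in text for kw in _TOOLSET_KWS)
--     dom = sum(kw in text for kw in _DOMAIN_KWS)
--     # max((count, name)) unrolled: on equal counts "toolset" beats
--     # "infrastructure" beats "domain" alphabetically.
--     if tool and tool >= infra and tool >= dom:
--         return "toolset"
--     if infra and infra >= dom:
--         return "infrastructure"
--     if dom:
--         return "domain"
--     return None
-- ===== Notes on version B (the rewrite author's own statement) =====
-- stated objective: simpler
-- what changed: B drops A's vote dict and max-with-(count,name)-key entirely: it computes three staged per-classification hit counts and decides with an unrolled comparison ladder whose branch order ('toolset' before 'infrastructure' before 'domain') encodes the alphabetical tie-break.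
import Mathlib
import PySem

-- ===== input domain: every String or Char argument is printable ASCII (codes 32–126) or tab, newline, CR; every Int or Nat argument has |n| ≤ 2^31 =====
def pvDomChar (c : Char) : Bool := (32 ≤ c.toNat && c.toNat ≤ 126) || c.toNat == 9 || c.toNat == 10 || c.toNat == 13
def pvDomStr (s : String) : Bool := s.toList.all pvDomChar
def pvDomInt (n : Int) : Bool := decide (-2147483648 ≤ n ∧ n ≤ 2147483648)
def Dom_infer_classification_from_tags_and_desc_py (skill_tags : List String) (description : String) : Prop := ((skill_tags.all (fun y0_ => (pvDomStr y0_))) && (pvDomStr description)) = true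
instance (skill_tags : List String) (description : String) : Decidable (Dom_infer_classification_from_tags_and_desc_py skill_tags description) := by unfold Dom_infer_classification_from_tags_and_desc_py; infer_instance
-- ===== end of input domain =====

-- B replaces A's vote dict and max-with-key by three staged keyword counts and
-- an unrolled (count, name) decision ladder (objective: simpler, same cost).

-- ===== PORT A =====
def tagHints : List (String × String) :=
  [("quality", "infrastructure"), ("engine", "infrastructure"),
   ("monitoring", "infrastructure"), ("gate", "infrastructure"),
   ("infra", "infrastructure"),
   ("workflow", "toolset"), ("process", "toolset"), ("pipeline", "toolset"),
   ("automation", "toolset"), ("orchestration", "toolset"),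
   ("integration", "toolset"),
   ("domain", "domain"), ("creative", "domain"), ("design", "domain"),
   ("analysis", "domain")]

def infer_classification_from_tags_and_desc_py (skill_tags : List String) (description : String) : Option String :=
  -- text = " ".join(skill_tags).lower() + " " + description.lower()
  let text : List Char :=
    PySem.Chars.lower (PySem.Chars.join [' '] (skill_tags.map String.toList)) ++ [' '] ++ PySem.Chars.lower description.toList
  -- for keyword, classification in _TAG_HINTS.items(): if keyword in text: votes[...] = votes.get(...,0)+1
  let votes : PySem.Dict String Int :=
    tagHints.foldl
      (fun v kv => if PySem.Chars.isIn kv.1.toList text then PySem.Dict.modify v kv.2 0 (· + 1) else v)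
      PySem.Dict.empty
  if votes.items.isEmpty then none
  else
    -- max(votes, key=lambda k: (votes[k], k)); votes[k] is present for every k in keys, so getD's default is unreachable
    PySem.List.max2? votes.keys (fun k => PySem.Dict.getD votes k 0) (fun k => k.toList)

-- ===== PORT B =====
def infraKws : List String := ["quality", "engine", "monitoring", "gate", "infra"]
def toolsetKws : List String := ["workflow", "process", "pipeline", "automation", "orchestration", "integration"]
def domainKws : List String := ["domain", "creative", "design", "analysis"]

-- sum(kw in text for kw in kws)
def countHits (kws : List String) (text : List Char) : Int :=
  kws.foldl (fun n kw => n + (if PySem.Chars.isIn kw.toList text then 1 else 0)) 0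

def infer_classification_from_tags_and_desc_py_alt (skill_tags : List String) (description : String) : Option String :=
  let text : List Char :=
    PySem.Chars.lower (PySem.Chars.join [' '] (skill_tags.map String.toList)) ++ [' '] ++ PySem.Chars.lower description.toList
  let infra := countHits infraKws text
  let tool := countHits toolsetKws text
  let dom := countHits domainKws text
  -- max((count, name)) unrolled: on ties "toolset" > "infrastructure" > "domain"
  if tool ≠ 0 ∧ infra ≤ tool ∧ dom ≤ tool then some "toolset"
  else if infra ≠ 0 ∧ dom ≤ infra then some "infrastructure"
  else if dom ≠ 0 then some "domain"
  else none

-- ===== PRECONDITION & SPEC =====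
def Spec_infer_classification_from_tags_and_desc_py (skill_tags : List String) (description : String) (out : Option String) : Prop := out = infer_classification_from_tags_and_desc_py_alt skill_tags description
instance (skill_tags : List String) (description : String) (out : Option String) : Decidable (Spec_infer_classification_from_tags_and_desc_py skill_tags description out) := by unfold Spec_infer_classification_from_tags_and_desc_py; infer_instance

-- ===== CLAIM =====
def Claim_equal_infer_classification_from_tags_and_desc_py : Prop := ∀ (skill_tags : List String) (description : String), Dom_infer_classification_from_tags_and_desc_py skill_tags description → Spec_infer_classification_from_tags_and_desc_py skill_tags description (infer_classification_from_tags_and_desc_py skill_tags description)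

-- ===== LEMMAS AND PROOFS =====

-- iterated `votes[c] = votes.get(c, 0) + 1`
def addN (v : PySem.Dict String Int) (c : String) : Nat → PySem.Dict String Int
  | 0 => v
  | n + 1 => addN (PySem.Dict.modify v c 0 (· + 1)) c n

theorem foldl_vote_block (p : String → Bool) (c : String) (kws : List String)
    (v : PySem.Dict String Int) :
    kws.foldl (fun v kw => if p kw then PySem.Dict.modify v c 0 (· + 1) else v) v
      = addN v c (kws.countP p) := by
  induction kws generalizing v with
  | nil => rfl
  | cons k t ih =>
    by_cases h : p k = true
    · simp [List.foldl_cons, h, ih]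
      rfl
    · simp [List.foldl_cons, h, ih]

theorem foldl_vote_block_pairs (p : String → Bool) (c : String) (kws : List String)
    (v : PySem.Dict String Int) :
    (kws.map (fun k => (k, c))).foldl
        (fun v kv => if p kv.1 then PySem.Dict.modify v kv.2 0 (· + 1) else v) v
      = addN v c (kws.countP p) := by
  rw [List.foldl_map]
  exact foldl_vote_block p c kws v

theorem countHits_aux (p : String → Bool) (kws : List String) (n : Int) :
    kws.foldl (fun n kw => n + (if p kw then 1 else 0)) n = n + (kws.countP p : Int) := by
  induction kws generalizing n with
  | nil => simp
  | cons k t ih =>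
    by_cases h : p k = true <;> simp [List.foldl_cons, h, ih] <;> omega

theorem countHits_eq (kws : List String) (text : List Char) :
    countHits kws text
      = ((kws.countP (fun kw => PySem.Chars.isIn kw.toList text) : Nat) : Int) := by
  simpa using countHits_aux (fun kw => PySem.Chars.isIn kw.toList text) kws 0

theorem tagHints_eq :
    tagHints
      = (infraKws.map (fun k => (k, "infrastructure")))
        ++ (toolsetKws.map (fun k => (k, "toolset")))
        ++ (domainKws.map (fun k => (k, "domain"))) := rfl

theorem core (text : List Char) :
    (let votes : PySem.Dict String Int :=
      tagHints.foldl
        (fun v kv => if PySem.Chars.isIn kv.1.toList text then PySem.Dict.modify v kv.2 0 (· + 1) else v)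
        PySem.Dict.empty
     if votes.items.isEmpty then none
     else PySem.List.max2? votes.keys (fun k => PySem.Dict.getD votes k 0) (fun k => k.toList))
      = (let infra := countHits infraKws text
         let tool := countHits toolsetKws text
         let dom := countHits domainKws text
         if tool ≠ 0 ∧ infra ≤ tool ∧ dom ≤ tool then some "toolset"
         else if infra ≠ 0 ∧ dom ≤ infra then some "infrastructure"
         else if dom ≠ 0 then some "domain"
         else none) := by
  simp only [tagHints_eq, List.foldl_append,
    foldl_vote_block_pairs (fun kw => PySem.Chars.isIn kw.toList text),
    countHits_eq]
  have hi : List.countP (fun kw => PySem.Chars.isIn kw.toList text) infraKws ≤ 5 := by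
    simpa [infraKws] using
      (List.countP_le_length (p := fun kw => PySem.Chars.isIn kw.toList text) (l := infraKws))
  have ht : List.countP (fun kw => PySem.Chars.isIn kw.toList text) toolsetKws ≤ 6 := by
    simpa [toolsetKws] using
      (List.countP_le_length (p := fun kw => PySem.Chars.isIn kw.toList text) (l := toolsetKws))
  have hd : List.countP (fun kw => PySem.Chars.isIn kw.toList text) domainKws ≤ 4 := by
    simpa [domainKws] using
      (List.countP_le_length (p := fun kw => PySem.Chars.isIn kw.toList text) (l := domainKws))
  generalize List.countP (fun kw => PySem.Chars.isIn kw.toList text) infraKws = i at hi ⊢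
  generalize List.countP (fun kw => PySem.Chars.isIn kw.toList text) toolsetKws = t at ht ⊢
  generalize List.countP (fun kw => PySem.Chars.isIn kw.toList text) domainKws = d at hd ⊢
  interval_cases i <;> interval_cases t <;> interval_cases d <;> decide

-- ===== VERDICT =====
theorem infer_classification_from_tags_and_desc_py_spec : Claim_equal_infer_classification_from_tags_and_desc_py := by
  intro skill_tags description _
  unfold Spec_infer_classification_from_tags_and_desc_py
  unfold infer_classification_from_tags_and_desc_py infer_classification_from_tags_and_desc_py_alt
  exact core _
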